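-- pv_equiv track=rewrite | github.com/rgarciadominguez/fund-analyzer | agents/concept_mapper.py | _deterministic_sample
-- ===== SOURCE A (Python) =====
-- def _deterministic_sample(full_text: str, total_pages: int, max_chars: int = 700_000) -> str:
--     """
--     Si el texto completo excede max_chars, hace sampling determinista
--     preservando first/last de cada página (no usa keywords — totalmente
--     agnóstico al contenido).
--     """
--     if len(full_text) <= max_chars:
--         return full_text
--     # Sampling: tomar primera N líneas de cada página hasta caber
--     lines = full_text.splitlines()
--     out: list[str] = []
--     char_budget = max_chars
--     current_page_lines: list[str] = []
--     page_char_budget = max(500, max_chars // max(1, total_pages))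
--     for line in lines:
--         if line.startswith("--- PAGE "):
--             if current_page_lines:
--                 chunk = "\n".join(current_page_lines)
--                 out.append(chunk[:page_char_budget])
--                 char_budget -= len(chunk[:page_char_budget])
--             current_page_lines = [line]
--             if char_budget <= 0:
--                 break
--         else:
--             current_page_lines.append(line)
--     if current_page_lines and char_budget > 0:
--         chunk = "\n".join(current_page_lines)
--         out.append(chunk[:page_char_budget])
--     return "\n".join(out)
-- ===== SOURCE B (Python) =====
-- def _deterministic_sample(full_text: str, total_pages: int, max_chars: int = 700_000) -> str:
--     if len(full_text) <= max_chars: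
--         return full_text
--     page_char_budget = max(500, max_chars // max(1, total_pages))
--     # Phase 1: split the lines into segments: a leading segment (possibly
--     # empty) followed by one segment per "--- PAGE " marker line.
--     segs = [[]]
--     for line in full_text.splitlines():
--         if line.startswith("--- PAGE "):
--             segs.append([line])
--         else:
--             segs[-1].append(line)
--     # Phase 2: consume segments against the budget.  Each non-final segment
--     # is flushed (if non-empty) and charged to the budget; the budget check
--     # happens once per marker.  The final segment is flushed uncharged,
--     # guarded by a positive budget.
--     out = []
--     budget = max_chars
--     for i in range(len(segs) - 1):
--         if segs[i]:
--             c = "\n".join(segs[i])[:page_char_budget]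
--             out.append(c)
--             budget -= len(c)
--         if budget <= 0:
--             return "\n".join(out)
--     if segs[-1] and budget > 0:
--         out.append("\n".join(segs[-1])[:page_char_budget])
--     return "\n".join(out)
-- ===== Notes on version B (the rewrite author's own statement) =====
-- stated objective: alternative
-- what changed: A's single fused loop (flush-on-marker with in-loop budget bookkeeping) is replaced by a two-phase decomposition: first parse the lines into a leading segment plus one segment per '--- PAGE ' marker, then a separate consumption loop charges each segment against the budget.
import Mathlib
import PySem

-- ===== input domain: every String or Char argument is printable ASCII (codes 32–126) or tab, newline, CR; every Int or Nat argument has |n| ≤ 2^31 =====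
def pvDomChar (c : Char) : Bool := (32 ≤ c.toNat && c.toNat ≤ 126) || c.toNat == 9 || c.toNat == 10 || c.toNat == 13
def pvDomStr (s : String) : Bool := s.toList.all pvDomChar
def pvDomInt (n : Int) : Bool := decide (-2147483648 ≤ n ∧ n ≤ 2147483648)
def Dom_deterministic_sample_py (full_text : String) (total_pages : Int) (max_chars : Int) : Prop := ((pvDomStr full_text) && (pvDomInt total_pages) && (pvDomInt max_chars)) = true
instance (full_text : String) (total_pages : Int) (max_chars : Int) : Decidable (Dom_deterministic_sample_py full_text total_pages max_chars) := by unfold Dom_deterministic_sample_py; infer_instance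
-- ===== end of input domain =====

-- B replaces A's single fused loop by a two-phase decomposition (parse the lines
-- into page segments, then consume the segment list against the budget); objective:
-- alternative structure, same cost.

-- ===== PORT A =====
-- line.startswith("--- PAGE ")
def dsMarker (l : String) : Bool := PySem.Str.startswith l "--- PAGE "
-- "\n".join(seg)[:pcb]
def dsChunk (seg : List String) (pcb : Int) : String :=
  PySem.Str.slice (PySem.Str.join "\n" seg) none (some pcb)

-- A's for-loop over lines with state (out, char_budget, current_page_lines)
def dsA_loop (pcb : Int) : List String → List String → Int → List String → List String
  | [], out, budget, cur =>
      -- trailing 'if current_page_lines and char_budget > 0'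
      if !cur.isEmpty && decide (budget > 0) then out ++ [dsChunk cur pcb] else out
  | l :: rest, out, budget, cur =>
      if dsMarker l then
        let out' := if cur.isEmpty then out else out ++ [dsChunk cur pcb]
        let budget' := if cur.isEmpty then budget else budget - (PySem.Str.len (dsChunk cur pcb) : Int)
        if budget' ≤ 0 then out'   -- break (final flush skipped: cur' nonempty but budget' ≤ 0)
        else dsA_loop pcb rest out' budget' [l]
      else dsA_loop pcb rest out budget (cur ++ [l])

def deterministic_sample_py (full_text : String) (total_pages : Int) (max_chars : Int) : String :=
  if (PySem.Str.len full_text : Int) ≤ max_chars then full_text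
  else
    let pcb := max 500 (PySem.Int.floordiv max_chars (max 1 total_pages))
    PySem.Str.join "\n" (dsA_loop pcb (PySem.Str.splitlines full_text) [] max_chars [])

-- ===== PORT B =====
-- Phase 1: segs = [[]]; append markers as new segments, other lines to segs[-1]
def dsB_parse : List String → List (List String) → List String → List (List String)
  | [], closed, cur => closed ++ [cur]
  | l :: rest, closed, cur =>
      if dsMarker l then dsB_parse rest (closed ++ [cur]) [l]
      else dsB_parse rest closed (cur ++ [l])

-- Phase 2: flush each non-final segment (if non-empty) against the budget,
-- checking once per segment boundary; the final segment is guarded by budget > 0.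
def dsB_consume (pcb : Int) : List (List String) → List String → Int → List String
  | [], out, _ => out
  | [last], out, budget =>
      if !last.isEmpty && decide (budget > 0) then out ++ [dsChunk last pcb] else out
  | s :: rest, out, budget =>
      let out' := if s.isEmpty then out else out ++ [dsChunk s pcb]
      let budget' := if s.isEmpty then budget else budget - (PySem.Str.len (dsChunk s pcb) : Int)
      if budget' ≤ 0 then out' else dsB_consume pcb rest out' budget'

def deterministic_sample_py_alt (full_text : String) (total_pages : Int) (max_chars : Int) : String :=
  if (PySem.Str.len full_text : Int) ≤ max_chars then full_text
  else
    let pcb := max 500 (PySem.Int.floordiv max_chars (max 1 total_pages))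
    PySem.Str.join "\n"
      (dsB_consume pcb (dsB_parse (PySem.Str.splitlines full_text) [] []) [] max_chars)

-- ===== PRECONDITION & SPEC =====
def Spec_deterministic_sample_py (full_text : String) (total_pages : Int) (max_chars : Int) (out : String) : Prop := out = deterministic_sample_py_alt full_text total_pages max_chars
instance (full_text : String) (total_pages : Int) (max_chars : Int) (out : String) : Decidable (Spec_deterministic_sample_py full_text total_pages max_chars out) := by unfold Spec_deterministic_sample_py; infer_instance

-- ===== CLAIM (what is proved, stated in full; the proofs are below) =====
def Claim_equal_deterministic_sample_py : Prop := ∀ (full_text : String) (total_pages : Int) (max_chars : Int), Dom_deterministic_sample_py full_text total_pages max_chars → Spec_deterministic_sample_py full_text total_pages max_chars (deterministic_sample_py full_text total_pages max_chars)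

-- ===== LEMMAS AND PROOFS =====

theorem dsB_parse_append (lines : List String) (closed : List (List String)) (cur : List String) :
    dsB_parse lines closed cur = closed ++ dsB_parse lines [] cur := by
  induction lines generalizing closed cur with
  | nil => simp [dsB_parse]
  | cons l rest ih =>
      by_cases h : dsMarker l
      · simp only [dsB_parse, h, if_true, List.nil_append]
        rw [ih (closed ++ [cur]), ih [cur]]
        simp
      · simp only [dsB_parse, h, Bool.false_eq_true, if_false]
        exact ih _ _

theorem dsB_parse_ne_nil (lines : List String) (closed : List (List String)) (cur : List String) :
    dsB_parse lines closed cur ≠ [] := by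
  induction lines generalizing closed cur with
  | nil => simp [dsB_parse]
  | cons l rest ih =>
      by_cases h : dsMarker l <;> simp [dsB_parse, h] <;> exact ih _ _

theorem dsA_eq_dsB (pcb : Int) (lines : List String) (out : List String) (budget : Int)
    (cur : List String) :
    dsA_loop pcb lines out budget cur = dsB_consume pcb (dsB_parse lines [] cur) out budget := by
  induction lines generalizing out budget cur with
  | nil => simp [dsA_loop, dsB_parse, dsB_consume]
  | cons l rest ih =>
      by_cases h : dsMarker l
      · rw [dsB_parse]
        simp only [h, if_true, List.nil_append, dsB_parse_append rest [cur]]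
        obtain ⟨r0, rtail, hr⟩ := List.exists_cons_of_ne_nil (dsB_parse_ne_nil rest [] [l])
        rw [hr, List.singleton_append, dsA_loop]
        simp only [h, if_true, dsB_consume]
        split <;> split <;> first | rfl | rw [ih, hr]
      · rw [dsA_loop, dsB_parse]
        simp only [h, Bool.false_eq_true, if_false]
        exact ih out budget (cur ++ [l])

-- ===== VERDICT (by name: the statement is the Claim_ definition above) =====
theorem deterministic_sample_py_spec : Claim_equal_deterministic_sample_py := by
  intro full_text total_pages max_chars _
  unfold Spec_deterministic_sample_py deterministic_sample_py deterministic_sample_py_alt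
  split
  · rfl
  · simp only [dsA_eq_dsB]
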